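-- pv_equiv track=rewrite | github.com/WildeCode/Advent-of-Code | 2021/Day 3/day3.py | find_csr
-- ===== SOURCE A (Python) =====
-- def binary_to_decimal(binary):
--     decimal = 0
--     power_list = []
--     for i in range(len(binary)):
--         power_list.append(2**i)
--     binary = binary[len(binary)::-1]
--
--     for i in range(len(binary)):
--         decimal += int(binary[i]) * power_list[i]
--         i += 1
--     return decimal
--
-- def find_csr(report, i):
--     # Recursive function to find csr
--
--     common_bit = 0
--     for line in report: # start finding most common bit value based on current index
--         if line[i] == '0':
--             common_bit -= 1
--         elif line[i] == '1':
--             common_bit += 1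
--
--     new_report = []
--     for line in report: # time to add the lines that meet the bit criteria
--         if common_bit >= 0 and line[i] == '0':
--             new_report.append(line)
--         elif common_bit < 0 and line[i] == '1':
--             new_report.append(line)
--     if len(new_report) == 1:
--         return binary_to_decimal(new_report[0])
--     else:
--         return find_csr(new_report, i+1)
-- ===== SOURCE B (Python) =====
-- def find_csr(report, i):
--     # iterative bit-criteria filter: partition by bit, keep the CSR side, Horner conversion
--     while len(report) > 1:
--         zeros = [line for line in report if line[i] == '0']
--         ones = [line for line in report if line[i] == '1']
--         report = ones if len(zeros) > len(ones) else zeros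
--         i += 1
--     value = 0
--     for ch in report[0]:
--         value = 2 * value + int(ch)
--     return value
-- ===== Notes on version B (the rewrite author's own statement) =====
-- stated objective: simpler
-- what changed: Replaced the recursion by an iterative while-loop that partitions each round into zero-lines and one-lines and compares their counts directly (instead of a +/-1 counter pass followed by a second two-condition filtering pass), and replaced binary_to_decimal's power-list + string-reversal + indexed sum by a single Horner's-rule pass over the string.
import Mathlib
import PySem

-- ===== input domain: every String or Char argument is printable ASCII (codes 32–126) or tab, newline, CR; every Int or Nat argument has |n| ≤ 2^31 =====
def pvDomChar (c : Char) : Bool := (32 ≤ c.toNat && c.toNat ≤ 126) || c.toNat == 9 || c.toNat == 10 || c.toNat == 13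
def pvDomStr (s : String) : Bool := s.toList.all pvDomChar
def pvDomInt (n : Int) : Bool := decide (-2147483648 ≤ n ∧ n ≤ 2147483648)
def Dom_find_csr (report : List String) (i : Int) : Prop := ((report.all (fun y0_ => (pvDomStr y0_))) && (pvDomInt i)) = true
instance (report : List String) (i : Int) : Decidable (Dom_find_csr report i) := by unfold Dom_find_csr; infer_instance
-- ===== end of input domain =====

-- B replaces A's recursion by an iterative while-loop that partitions each round by bit and
-- converts the surviving line by Horner's rule (objective: simpler).  Equality of RETURN values
-- is claimed on Pre_ (the inputs where the Python A returns instead of raising).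

-- ===== PORT A =====

-- int(one-char string); a non-digit raises ValueError in Python (excluded by Pre_), default 0 here
def pvInt1 (c : Char) : Int := (PySem.Int.ofChars? [c]).getD 0

def binary_to_decimal (binary : String) : Int :=
  let bl := binary.toList
  -- power_list.append(2**i) for i in range(len(binary))
  let power_list : List Int :=
    (PySem.List.pyRange 0 (bl.length : Int) 1).foldl (fun acc i => acc ++ [(2:Int) ^ i.toNat]) []
  -- binary = binary[len(binary)::-1]
  let rev : List Char := (PySem.List.slice? bl (some (bl.length : Int)) none (-1)).getD []
  -- decimal += int(binary[i]) * power_list[i]  (the trailing 'i += 1' of A is dead code)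
  (PySem.List.pyRange 0 (rev.length : Int) 1).foldl
    (fun dec i => dec + pvInt1 (PySem.List.pyGetD rev i ' ') * PySem.List.pyGetD power_list i 0) 0

-- the recursion, fuel-bounded: inside Pre_ every recursive call strictly shrinks the report,
-- so fuel = report.length always suffices (outside Pre_ the Python raises and the value is unclaimed)
def findCsrA : Nat → List String → Int → Int
  | 0, _, _ => 0
  | fuel+1, report, i =>
    let common_bit : Int := report.foldl (fun cb line =>
        if PySem.Str.pyGet? line i = some '0' then cb - 1
        else if PySem.Str.pyGet? line i = some '1' then cb + 1 else cb) 0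
    let new_report : List String := report.foldl (fun acc line =>
        if common_bit ≥ 0 ∧ PySem.Str.pyGet? line i = some '0' then acc ++ [line]
        else if common_bit < 0 ∧ PySem.Str.pyGet? line i = some '1' then acc ++ [line]
        else acc) []
    if new_report.length = 1 then binary_to_decimal (PySem.List.pyGetD new_report 0 "")
    else findCsrA fuel new_report (i + 1)

def find_csr (report : List String) (i : Int) : Int := findCsrA report.length report i

-- ===== PORT B =====

-- while len(report) > 1: partition by bit at i, keep the CSR side
def pvLoopB : Nat → List String × Int → List String × Int
  | 0, st => st
  | fuel+1, (report, i) =>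
    if 1 < report.length then
      let zeros := report.filter (fun line => decide (PySem.Str.pyGet? line i = some '0'))
      let ones  := report.filter (fun line => decide (PySem.Str.pyGet? line i = some '1'))
      pvLoopB fuel ((if ones.length < zeros.length then ones else zeros), i + 1)
    else (report, i)

def find_csr_alt (report : List String) (i : Int) : Int :=
  let st := pvLoopB report.length (report, i)
  -- value = 2 * value + int(ch) over report[0]
  ((st.1.getD 0 "").toList).foldl (fun v c => 2 * v + pvInt1 c) 0

-- ===== PRECONDITION & SPEC =====

-- one round of A's bit-criteria filtering (used only to state Pre_)
def pvCsrStep (st : List String × Int) : List String × Int :=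
  let cb : Int :=
    ((st.1.filter (fun l => decide (PySem.Str.pyGet? l st.2 = some '1'))).length : Int)
      - ((st.1.filter (fun l => decide (PySem.Str.pyGet? l st.2 = some '0'))).length : Int)
  (st.1.filter (fun l => decide (PySem.Str.pyGet? l st.2 = some (if 0 ≤ cb then '0' else '1'))), st.2 + 1)

-- A terminates iff iterating the filter reaches EXACTLY one line after k ≥ 1 rounds (it checks
-- after filtering), every executed round indexes every surviving line in range (else IndexError),
-- and the surviving line is all digits (else int() raises ValueError); A's termination is defined
-- by this process — there is no simpler closed form.  Pre_ is exactly that set of inputs.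
def Pre_find_csr (report : List String) (i : Int) : Prop :=
  ∃ k, k < report.length + 1 ∧ 0 < k ∧
    (∀ j < k, ∀ line ∈ (pvCsrStep^[j] (report, i)).1,
        PySem.Str.pyGet? line (pvCsrStep^[j] (report, i)).2 ≠ none) ∧
    (pvCsrStep^[k] (report, i)).1.length = 1 ∧
    ((pvCsrStep^[k] (report, i)).1.headD "").toList.all Char.isDigit = true
instance (report : List String) (i : Int) : Decidable (Pre_find_csr report i) := by
  unfold Pre_find_csr; infer_instance

def pvWitness_find_csr : List String × Int := (["0", "1"], 0)

def Spec_find_csr (report : List String) (i : Int) (out : Int) : Prop := out = find_csr_alt report i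
instance (report : List String) (i : Int) (out : Int) : Decidable (Spec_find_csr report i out) := by
  unfold Spec_find_csr; infer_instance

-- ===== CLAIM (what is proved, stated in full; the proofs are below) =====
def Claim_equal_find_csr : Prop := ∀ (report : List String) (i : Int), Dom_find_csr report i → Pre_find_csr report i → Spec_find_csr report i (find_csr report i)

-- ===== LEMMAS AND PROOFS =====

theorem pv_sliceIndices_len (n : Nat) :
    PySem.List.sliceIndices n (some (n:Int)) none (-1) = PySem.List.sliceIndices n none none (-1) := by
  simp only [PySem.List.sliceIndices]
  norm_num

theorem pv_slice_len_rev {α : Type} (xs : List α) :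
    PySem.List.slice? xs (some (xs.length:Int)) none (-1) = some xs.reverse := by
  have h := PySem.List.slice?_none_none_neg_one (xs := xs)
  simp only [PySem.List.slice?, pv_sliceIndices_len] at h ⊢
  exact h

theorem pv_horner_sum (l : List Char) (a : Int) :
    l.foldl (fun v c => 2 * v + pvInt1 c) a
      = a * 2 ^ l.length
        + ((List.range l.length).map (fun k => pvInt1 (l.reverse.getD k ' ') * 2 ^ k)).sum := by
  induction l generalizing a with
  | nil => simp
  | cons c t ih =>
    simp only [List.foldl_cons, List.length_cons, List.reverse_cons]
    rw [ih]
    rw [List.range_succ, List.map_append, List.sum_append]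
    have h1 : ∀ k ∈ List.range t.length,
        pvInt1 ((t.reverse ++ [c]).getD k ' ') * 2 ^ k
          = pvInt1 (t.reverse.getD k ' ') * 2 ^ k := by
      intro k hk
      have hk' : k < t.reverse.length := by simpa using List.mem_range.mp hk
      rw [List.getD_append _ _ _ _ hk']
    rw [List.map_congr_left h1]
    have h2 : (t.reverse ++ [c]).getD t.length ' ' = c := by
      have : t.reverse.length ≤ t.length := by simp
      rw [List.getD_append_right _ _ _ _ this]
      simp
    simp only [List.map_cons, List.map_nil, List.sum_cons, List.sum_nil, add_zero, h2]
    ring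

theorem pv_pl (n : Nat) :
    (PySem.List.pyRange 0 (n:Int) 1).foldl (fun acc i => acc ++ [(2:Int) ^ i.toNat]) []
      = (List.range n).map (fun k => (2:Int) ^ k) := by
  rw [PySem.List.pyRange_one]
  simp only [Int.sub_zero, Int.toNat_natCast, List.foldl_map]
  rw [PySem.List.foldl_append_singleton_eq_map, List.nil_append]
  apply List.map_congr_left
  intro k hk
  simp

theorem pv_pl_getD (n k : Nat) (hk : k < n) :
    ((List.range n).map (fun j => (2:Int) ^ j)).getD k 0 = 2 ^ k := by
  simp [List.getD, hk]

theorem pv_btd_horner (s : String) :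
    binary_to_decimal s = s.toList.foldl (fun v c => 2 * v + pvInt1 c) 0 := by
  simp only [binary_to_decimal]
  rw [pv_slice_len_rev, Option.getD_some, pv_pl]
  rw [PySem.List.pyRange_one]
  simp only [Int.sub_zero, Int.toNat_natCast, List.foldl_map, List.length_reverse, zero_add,
    PySem.List.pyGetD_natCast]
  rw [PySem.List.foldl_add, zero_add]
  have hmap : ∀ k ∈ List.range s.toList.length,
      pvInt1 (s.toList.reverse.getD k ' ')
          * ((List.range s.toList.length).map (fun j => (2:Int) ^ j)).getD k 0
        = pvInt1 (s.toList.reverse.getD k ' ') * 2 ^ k := by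
    intro k hk
    rw [pv_pl_getD _ _ (List.mem_range.mp hk)]
  rw [List.map_congr_left hmap]
  rw [pv_horner_sum]
  simp

theorem pv_cb_eq (g : String → Option Char) (r : List String) (a : Int) :
    r.foldl (fun cb line =>
        if g line = some '0' then cb - 1
        else if g line = some '1' then cb + 1 else cb) a
      = a + ((r.filter (fun l => decide (g l = some '1'))).length : Int)
          - ((r.filter (fun l => decide (g l = some '0'))).length : Int) := by
  induction r generalizing a with
  | nil => simp
  | cons l t ih =>
    by_cases h0 : g l = some '0'
    · simp only [List.foldl_cons, List.filter_cons, h0, if_true, decide_true,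
        List.length_cons, ih]
      norm_num
      push_cast
      ring
    · by_cases h1 : g l = some '1'
      · simp only [List.foldl_cons, List.filter_cons, h1, if_true, decide_true,
          List.length_cons, ih]
        norm_num
        push_cast
        ring
      · simp only [List.foldl_cons, List.filter_cons, h0, h1, if_false, decide_false, ih]
        norm_num

-- the helper the proofs use for one filtering round, in B's form
def pvSelect (g : String → Option Char) (r : List String) : List String :=
  let zeros := r.filter (fun l => decide (g l = some '0'))
  let ones  := r.filter (fun l => decide (g l = some '1'))
  if ones.length < zeros.length then ones else zeros

theorem pv_filter_if {α : Type} (r : List α) (p : α → Prop) [DecidablePred p] (acc : List α) :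
    r.foldl (fun acc line => if p line then acc ++ [line] else acc) acc
      = acc ++ r.filter (fun l => decide (p l)) := by
  induction r generalizing acc with
  | nil => simp
  | cons l t ih =>
    by_cases h : p l
    · simp [h, ih]
    · simp [h, ih]

theorem pv_stepA_eq (g : String → Option Char) (r : List String) (cb : Int)
    (hcb : cb = ((r.filter (fun l => decide (g l = some '1'))).length : Int)
        - ((r.filter (fun l => decide (g l = some '0'))).length : Int)) :
    r.foldl (fun acc line =>
        if cb ≥ 0 ∧ g line = some '0' then acc ++ [line]
        else if cb < 0 ∧ g line = some '1' then acc ++ [line]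
        else acc) []
      = pvSelect g r := by
  by_cases h : 0 ≤ cb
  · have hlt : ¬ cb < 0 := by omega
    have hfun : (fun (acc : List String) line =>
        if cb ≥ 0 ∧ g line = some '0' then acc ++ [line]
        else if cb < 0 ∧ g line = some '1' then acc ++ [line]
        else acc)
        = fun acc line => if g line = some '0' then acc ++ [line] else acc := by
      funext acc line
      simp [h, hlt, ge_iff_le]
    rw [hfun, pv_filter_if r (fun l => g l = some '0'), List.nil_append]
    simp only [pvSelect]
    rw [if_neg (by omega)]
  · have hlt : cb < 0 := by omega
    have hge : ¬ cb ≥ 0 := by omega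
    have hfun : (fun (acc : List String) line =>
        if cb ≥ 0 ∧ g line = some '0' then acc ++ [line]
        else if cb < 0 ∧ g line = some '1' then acc ++ [line]
        else acc)
        = fun acc line => if g line = some '1' then acc ++ [line] else acc := by
      funext acc line
      simp [hlt, hge]
    rw [hfun, pv_filter_if r (fun l => g l = some '1'), List.nil_append]
    simp only [pvSelect]
    rw [if_pos (by omega)]

theorem pv_select_lt (g : String → Option Char) (r : List String) (h : r ≠ []) :
    (pvSelect g r).length < r.length := by
  unfold pvSelect
  by_cases hc : (r.filter (fun l => decide (g l = some '1'))).length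
      < (r.filter (fun l => decide (g l = some '0'))).length
  · rw [if_pos hc]
    exact lt_of_lt_of_le hc (List.length_filter_le _ _)
  · rw [if_neg hc]
    rcases Nat.lt_or_ge (r.filter (fun l => decide (g l = some '0'))).length
        r.length with hlt | hge
    · exact hlt
    · exfalso
      have heq : (r.filter (fun l => decide (g l = some '0'))).length
          = r.length := le_antisymm (List.length_filter_le _ _) hge
      have hall : ∀ l ∈ r, g l = some '0' := by
        have := (List.length_filter_eq_length_iff).mp heq
        intro l hl
        simpa using this l hl
      have hones : r.filter (fun l => decide (g l = some '1')) = [] := by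
        rw [List.filter_eq_nil_iff]
        intro l hl
        rw [hall l hl]
        simp
      rw [hones, List.length_nil] at hc
      have : r.length = 0 := by omega
      exact h (List.eq_nil_of_length_eq_zero this)

-- specialisations in the exact syntactic form appearing in the ports
theorem pv_cb_eq' (r : List String) (i a : Int) :
    r.foldl (fun cb line =>
        if PySem.Str.pyGet? line i = some '0' then cb - 1
        else if PySem.Str.pyGet? line i = some '1' then cb + 1 else cb) a
      = a + ((r.filter (fun l => decide (PySem.Str.pyGet? l i = some '1'))).length : Int)
          - ((r.filter (fun l => decide (PySem.Str.pyGet? l i = some '0'))).length : Int) :=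
  pv_cb_eq (fun l => PySem.Str.pyGet? l i) r a

theorem pv_stepA_eq' (r : List String) (i cb : Int)
    (hcb : cb = ((r.filter (fun l => decide (PySem.Str.pyGet? l i = some '1'))).length : Int)
        - ((r.filter (fun l => decide (PySem.Str.pyGet? l i = some '0'))).length : Int)) :
    r.foldl (fun acc line =>
        if cb ≥ 0 ∧ PySem.Str.pyGet? line i = some '0' then acc ++ [line]
        else if cb < 0 ∧ PySem.Str.pyGet? line i = some '1' then acc ++ [line]
        else acc) []
      = pvSelect (fun l => PySem.Str.pyGet? l i) r :=
  pv_stepA_eq (fun l => PySem.Str.pyGet? l i) r cb hcb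

theorem pv_findA_nil (fuel : Nat) (i : Int) : findCsrA fuel [] i = 0 := by
  induction fuel generalizing i with
  | zero => rfl
  | succ f ih => simpa [findCsrA] using ih (i + 1)

theorem pv_findA_succ (f : Nat) (r : List String) (i : Int) :
    findCsrA (f + 1) r i
      = (if (pvSelect (fun l => PySem.Str.pyGet? l i) r).length = 1 then
          binary_to_decimal (PySem.List.pyGetD (pvSelect (fun l => PySem.Str.pyGet? l i) r) 0 "")
        else findCsrA f (pvSelect (fun l => PySem.Str.pyGet? l i) r) (i + 1)) := by
  conv_lhs => rw [findCsrA]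
  rw [pv_cb_eq' r i 0, pv_stepA_eq' r i _ (by ring)]

theorem pv_loopB_stop (fuel : Nat) (r : List String) (i : Int) (h : ¬ 1 < r.length) :
    pvLoopB fuel (r, i) = (r, i) := by
  cases fuel with
  | zero => rfl
  | succ f => rw [pvLoopB, if_neg h]

theorem pv_loopB_succ (f : Nat) (r : List String) (i : Int) (h : 1 < r.length) :
    pvLoopB (f + 1) (r, i) = pvLoopB f (pvSelect (fun l => PySem.Str.pyGet? l i) r, i + 1) := by
  rw [pvLoopB, if_pos h]
  rfl

theorem pv_AB_eq (fuel : Nat) : ∀ (r : List String) (i : Int), r.length ≤ fuel + 1 → 1 < r.length →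
    findCsrA (fuel + 1) r i
      = (((pvLoopB (fuel + 1) (r, i)).1.getD 0 "").toList).foldl (fun v c => 2 * v + pvInt1 c) 0 := by
  induction fuel with
  | zero =>
    intro r i hle hlen
    omega
  | succ f ih =>
    intro r i hle hlen
    rw [pv_findA_succ, pv_loopB_succ _ _ _ hlen]
    by_cases h1 : (pvSelect (fun l => PySem.Str.pyGet? l i) r).length = 1
    · rw [if_pos h1, pv_loopB_stop _ _ _ (by omega), pv_btd_horner]
      congr 1
      simp [PySem.List.pyGetD_zero]
    · rw [if_neg h1]
      have hlt : (pvSelect (fun l => PySem.Str.pyGet? l i) r).length < r.length :=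
        pv_select_lt _ r (by intro hnil; rw [hnil] at hlen; simp at hlen)
      by_cases h0 : pvSelect (fun l => PySem.Str.pyGet? l i) r = []
      · rw [h0, pv_findA_nil, pv_loopB_stop _ _ _ (by simp)]
        simp
      · have h2 : 1 < (pvSelect (fun l => PySem.Str.pyGet? l i) r).length := by
          have : (pvSelect (fun l => PySem.Str.pyGet? l i) r).length ≠ 0 := by
            intro hz
            exact h0 (List.eq_nil_of_length_eq_zero hz)
          omega
        exact ih _ (i + 1) (by omega) h2

theorem pv_step_nil (i : Int) : pvCsrStep ([], i) = ([], i + 1) := by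
  simp [pvCsrStep]

theorem pv_step_singleton (l : String) (i : Int) : pvCsrStep ([l], i) = ([], i + 1) := by
  rcases ho : PySem.Str.pyGet? l i with _ | c <;>
    simp only [PySem.Str.pyGet?, PySem.Chars.pyGet?] at ho
  · simp [pvCsrStep, ho]
  · by_cases hc0 : c = '0'
    · subst hc0
      simp [pvCsrStep, ho]
    · by_cases hc1 : c = '1'
      · subst hc1
        simp [pvCsrStep, ho]
      · simp [pvCsrStep, ho, hc0, hc1]

theorem pv_iter_nil (k : Nat) : ∀ (i : Int), (pvCsrStep^[k] ([], i)).1 = [] := by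
  induction k with
  | zero => intro i; rfl
  | succ k ih =>
    intro i
    rw [Function.iterate_succ_apply, pv_step_nil]
    exact ih (i + 1)

theorem pv_pre_len (report : List String) (i : Int) (h : Pre_find_csr report i) :
    1 < report.length := by
  obtain ⟨k, hkn, hk0, hidx, hlen1, hdig⟩ := h
  rcases report with _ | ⟨a, _ | ⟨b, t⟩⟩
  · rw [pv_iter_nil] at hlen1
    simp at hlen1
  · obtain ⟨k2, rfl⟩ : ∃ k2, k = k2 + 1 := ⟨k - 1, by omega⟩
    rw [Function.iterate_succ_apply, pv_step_singleton, pv_iter_nil] at hlen1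
    simp at hlen1
  · simp only [List.length_cons]
    omega

-- ===== VERDICT (by name: the statement is the Claim_ definition above) =====
theorem find_csr_spec : Claim_equal_find_csr := by
  intro report i _ hpre
  unfold Spec_find_csr find_csr find_csr_alt
  have hlen := pv_pre_len report i hpre
  obtain ⟨f, hf⟩ : ∃ f, report.length = f + 1 := ⟨report.length - 1, by omega⟩
  rw [hf]
  exact pv_AB_eq f report i (by omega) hlen
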